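-- pv_equiv track=rewrite | github.com/ram97-boop/Representative-Sequence | testing/rep_transc.py | getRepSeqFromScores
-- ===== SOURCE A (Python) =====
-- def getRepSeqFromScores(scoreMatrix):
--     '''
--     Returns the number (place) where the representative
--     sequence is in its gene file. So if, for example,
--     the 4th sequence is the representative in a file of
--     5 sequences, then 4 will be returned.
--     '''
--     scoreSum = []
--     for seqScores in scoreMatrix:
--         # Sum all the scores of the sequence
--         # and put it in scoreSum
--         scoreSum.append(sum(seqScores))
--
--     # Get the index of scoreSum with the maximum sum
--     max_i = 0
--     i = 0
--     while i < len(scoreSum):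
--         if scoreSum[i] > scoreSum[max_i]:
--             max_i = i
--         i+=1
--
--     return max_i
-- ===== SOURCE B (Python) =====
-- def getRepSeqFromScores(scoreMatrix):
--     # Single fused pass: track best index and best row-sum directly,
--     # no intermediate scoreSum list and no second argmax scan.
--     best_i = 0
--     best = None
--     for i, row in enumerate(scoreMatrix):
--         s = sum(row)
--         if best is None or s > best:
--             best_i, best = i, s
--     return best_i
-- ===== Notes on version B (the rewrite author's own statement) =====
-- stated objective: simpler
-- what changed: Fuses A's two passes (build scoreSum list, then while-loop argmax with repeated indexing) into one enumerate pass that keeps the best index and best running sum directly, with no intermediate list and no index-based lookups.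
import Mathlib
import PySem

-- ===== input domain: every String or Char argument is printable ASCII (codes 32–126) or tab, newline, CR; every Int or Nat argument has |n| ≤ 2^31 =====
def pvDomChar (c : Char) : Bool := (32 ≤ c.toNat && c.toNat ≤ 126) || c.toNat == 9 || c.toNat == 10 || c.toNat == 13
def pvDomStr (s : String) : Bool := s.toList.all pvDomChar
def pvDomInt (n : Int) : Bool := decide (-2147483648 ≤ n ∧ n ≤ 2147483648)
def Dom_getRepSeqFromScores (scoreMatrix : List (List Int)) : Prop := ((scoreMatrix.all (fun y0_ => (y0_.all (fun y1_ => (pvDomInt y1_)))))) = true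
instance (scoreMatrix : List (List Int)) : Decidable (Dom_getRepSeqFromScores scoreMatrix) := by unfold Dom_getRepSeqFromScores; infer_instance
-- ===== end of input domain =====

-- B fuses A's two passes (sum list + while-loop argmax) into one enumerate pass (objective: simpler).

-- ===== PORT A =====
def getRepSeqFromScores (scoreMatrix : List (List Int)) : Int :=
  -- scoreSum = []; for seqScores in scoreMatrix: scoreSum.append(sum(seqScores))
  let scoreSum : List Int :=
    scoreMatrix.foldl (fun acc seqScores => acc ++ [seqScores.foldl (· + ·) 0]) []
  -- max_i = 0; i = 0; while i < len(scoreSum): if scoreSum[i] > scoreSum[max_i]: max_i = i; i += 1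
  -- (indices are always in range, so pyGetD with default 0 is exact)
  (PySem.List.pyRange 0 (scoreSum.length : Int) 1).foldl
    (fun max_i i =>
      if PySem.List.pyGetD scoreSum i 0 > PySem.List.pyGetD scoreSum max_i 0 then i else max_i)
    0

-- ===== PORT B =====
def getRepSeqFromScores_alt (scoreMatrix : List (List Int)) : Int :=
  -- best_i = 0; best = None; for i, row in enumerate(scoreMatrix): s = sum(row); update
  ((PySem.List.enumerate scoreMatrix 0).foldl
    (fun (st : Int × Option Int) p =>
      let s := p.2.foldl (· + ·) 0
      match st.2 with
      | none => (p.1, some s)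
      | some v => if s > v then (p.1, some s) else st)
    (0, none)).1

-- ===== PRECONDITION & SPEC =====
def Spec_getRepSeqFromScores (scoreMatrix : List (List Int)) (out : Int) : Prop := out = getRepSeqFromScores_alt scoreMatrix
instance (scoreMatrix : List (List Int)) (out : Int) : Decidable (Spec_getRepSeqFromScores scoreMatrix out) := by unfold Spec_getRepSeqFromScores; infer_instance

-- ===== CLAIM (what is proved, stated in full; the proofs are below) =====
def Claim_equal_getRepSeqFromScores : Prop := ∀ (scoreMatrix : List (List Int)), Dom_getRepSeqFromScores scoreMatrix → Spec_getRepSeqFromScores scoreMatrix (getRepSeqFromScores scoreMatrix)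

-- ===== LEMMAS AND PROOFS =====

-- A's loop step over the fixed sums list
def stepA (sums : List Int) (max_i i : Int) : Int :=
  if PySem.List.pyGetD sums i 0 > PySem.List.pyGetD sums max_i 0 then i else max_i

-- B's loop step, acting on (index, value) pairs
def stepB (st : Int × Option Int) (p : Int × Int) : Int × Option Int :=
  match st.2 with
  | none => (p.1, some p.2)
  | some v => if p.2 > v then (p.1, some p.2) else st

-- B's fold over rows equals the same fold over the per-row sums
lemma b_fold_sums (rows : List (List Int)) (k : Int) (st : Int × Option Int) :
    (PySem.List.enumerate rows k).foldl
      (fun (st : Int × Option Int) p =>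
        let s := p.2.foldl (· + ·) 0
        match st.2 with
        | none => (p.1, some s)
        | some v => if s > v then (p.1, some s) else st) st
    = (PySem.List.enumerate (rows.map (fun r => r.foldl (· + ·) 0)) k).foldl stepB st := by
  induction rows generalizing k st with
  | nil => simp [PySem.List.enumerate_nil]
  | cons r rows ih =>
    simp only [List.map_cons, PySem.List.enumerate_cons, List.foldl_cons]
    rw [ih]
    rfl

lemma getD_append_self (pre : List Int) (s : Int) (t : List Int) :
    (pre ++ s :: t).getD pre.length 0 = s := by
  rw [List.getD_eq_getElem]
  · rw [List.getElem_append_right (le_refl pre.length)]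
    simp
  · simp

-- main invariant: after processing a prefix, A's index-loop and B's fused loop agree
lemma main_loop (t : List Int) : ∀ (pre : List Int) (m : Nat), m < pre.length + t.length →
    (PySem.List.pyRange (pre.length : Int) (((pre ++ t).length : Nat) : Int) 1).foldl
      (stepA (pre ++ t)) (m : Int)
    = ((PySem.List.enumerate t (pre.length : Int)).foldl stepB
        ((m : Int), some ((pre ++ t).getD m 0))).1 := by
  induction t with
  | nil =>
    intro pre m hm
    rw [PySem.List.pyRange_one_eq_nil (by simp)]
    simp [PySem.List.enumerate_nil]
  | cons s t ih =>
    intro pre m hm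
    have hlt : (pre.length : Int) < (((pre ++ s :: t).length : Nat) : Int) := by
      simp
    rw [PySem.List.pyRange_one_cons hlt]
    simp only [List.foldl_cons, PySem.List.enumerate_cons]
    have hs : PySem.List.pyGetD (pre ++ s :: t) ((pre.length : Nat) : Int) 0 = s := by
      rw [PySem.List.pyGetD_natCast]
      exact getD_append_self pre s t
    have hmv : PySem.List.pyGetD (pre ++ s :: t) ((m : Nat) : Int) 0 = (pre ++ s :: t).getD m 0 := by
      rw [PySem.List.pyGetD_natCast]
    have hassoc : pre ++ s :: t = pre ++ [s] ++ t := by simp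
    have hlen1 : (((pre ++ [s]).length : Nat) : Int) = ((pre.length : Nat) : Int) + 1 := by simp
    have hA : stepA (pre ++ s :: t) ((m : Nat) : Int) ((pre.length : Nat) : Int)
        = if s > (pre ++ s :: t).getD m 0 then ((pre.length : Nat) : Int) else ((m : Nat) : Int) := by
      unfold stepA; rw [hs, hmv]
    have hB : stepB (((m : Nat) : Int), some ((pre ++ s :: t).getD m 0)) (((pre.length : Nat) : Int), s)
        = if s > (pre ++ s :: t).getD m 0
          then (((pre.length : Nat) : Int), some s)
          else (((m : Nat) : Int), some ((pre ++ s :: t).getD m 0)) := rfl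
    rw [hA, hB]
    by_cases hgt : s > (pre ++ s :: t).getD m 0
    · rw [if_pos hgt, if_pos hgt]
      have H := ih (pre ++ [s]) pre.length
        (by simp only [List.length_append, List.length_singleton]; omega)
      rw [← hassoc, hlen1] at H
      rw [show ((pre ++ s :: t).getD pre.length 0) = s from getD_append_self pre s t] at H
      exact H
    · rw [if_neg hgt, if_neg hgt]
      have H := ih (pre ++ [s]) m (by simp only [List.length_append, List.length_singleton]; simp at hm; omega)
      rw [← hassoc, hlen1] at H
      exact H

-- ===== VERDICT (by name: the statement is the Claim_ definition above) =====
theorem getRepSeqFromScores_spec : Claim_equal_getRepSeqFromScores := by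
  intro scoreMatrix _
  unfold Spec_getRepSeqFromScores getRepSeqFromScores getRepSeqFromScores_alt
  rw [PySem.List.foldl_append_singleton_eq_map, b_fold_sums]
  simp only [List.nil_append]
  generalize List.map (fun r => r.foldl (· + ·) 0) scoreMatrix = sums
  cases sums with
  | nil =>
    rw [PySem.List.pyRange_one_eq_nil (by simp)]
    simp [PySem.List.enumerate_nil]
  | cons s t =>
    have h0 : (0 : Int) < (((s :: t).length : Nat) : Int) := by simp
    rw [PySem.List.pyRange_one_cons h0]
    simp only [List.foldl_cons, PySem.List.enumerate_cons, zero_add]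
    rw [ite_self]
    have hB0 : stepB ((0 : Int), none) ((0 : Int), s) = ((0 : Int), some s) := rfl
    rw [hB0]
    have H := main_loop t [s] 0 (by simp)
    simp only [List.singleton_append, List.length_singleton, Nat.cast_one, Nat.cast_zero,
      List.getD_cons_zero] at H
    exact H
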